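-- pv_equiv track=rewrite | github.com/rebuilder945/FL_research | ast_research/python_code_5.23/page6/success_code/陈禹铭-4019-2023-11-03_20_00_54.py | encrypt_number
-- ===== SOURCE A (Python) =====
-- def encrypt_number(number):
--     number_str=str(number)
--     encrypted_number=[]
--     for i in range(len(number_str)):
--         digit=int(number_str[i])
--         digit=(digit+5)%10
--         encrypted_number.append(digit)
--     encrypted_number[0],encrypted_number[-1]=encrypted_number[-1],encrypted_number[0]
--     for i in range(1,len(encrypted_number)//2):
--         encrypted_number[i],encrypted_number[-(1+i)]=encrypted_number[-(1+i)],encrypted_number[i]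
--     encrypted_result=int(''.join(map(str,encrypted_number)))
--     return encrypted_result
-- ===== SOURCE B (Python) =====
-- def encrypt_number(number):
--     result = 0
--     power = 1
--     for c in str(number):
--         d = (int(c) + 5) % 10
--         result += d * power
--         power *= 10
--     return result
-- ===== Notes on version B (the rewrite author's own statement) =====
-- stated objective: simpler
-- what changed: Replaces A's build-digit-list / explicit first-last swap loop / join-and-reparse pipeline with a single left-to-right fold that accumulates each shifted digit at an increasing power of ten, so the reversal and the int() reparse disappear.
import Mathlib
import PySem

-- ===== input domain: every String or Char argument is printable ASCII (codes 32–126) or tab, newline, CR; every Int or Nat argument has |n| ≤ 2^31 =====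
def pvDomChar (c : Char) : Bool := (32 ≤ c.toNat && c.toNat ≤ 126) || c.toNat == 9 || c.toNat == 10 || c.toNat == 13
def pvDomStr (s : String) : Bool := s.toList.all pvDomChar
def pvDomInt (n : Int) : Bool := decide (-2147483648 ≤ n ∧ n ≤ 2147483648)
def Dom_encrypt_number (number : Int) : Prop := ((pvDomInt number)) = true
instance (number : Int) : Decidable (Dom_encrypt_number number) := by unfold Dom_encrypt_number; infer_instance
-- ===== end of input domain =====

-- B replaces A's digit-list / swap-reversal / join-and-reparse pipeline by a single
-- left-to-right fold accumulating shifted digits at growing powers of ten (objective: simpler).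

-- ===== PORT A =====
-- Python tuple swap l[i], l[j] = l[j], l[i]: both reads happen before both writes.
-- pyGetD/pySetD are the total forms; under Pre_ every index is in range (IndexError impossible).
def pySwapA (l : List Int) (i j : Int) : List Int :=
  let a := PySem.List.pyGetD l j 0
  let b := PySem.List.pyGetD l i 0
  PySem.List.pySetD (PySem.List.pySetD l i a) j b

def encrypt_number (number : Int) : Int :=
  let number_str := PySem.Int.toChars number                    -- number_str = str(number)
  let encrypted_number : List Int :=                            -- first loop: append (int(number_str[i])+5)%10
    (PySem.List.pyRange 0 (PySem.List.len number_str) 1).foldl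
      (fun acc i =>
        let digit := (PySem.Int.ofChars? [PySem.List.pyGetD number_str i ' ']).getD 0
        -- int(number_str[i]); under Pre_ the char is a digit, so ofChars? never returns none
        let digit := PySem.Int.mod (digit + 5) 10
        acc ++ [digit]) []
  let encrypted_number := pySwapA encrypted_number 0 (-1)       -- enc[0], enc[-1] = enc[-1], enc[0]
  let encrypted_number :=                                       -- for i in range(1, len(enc)//2): swap i, -(1+i)
    (PySem.List.pyRange 1 (PySem.Int.floordiv (PySem.List.len encrypted_number) 2) 1).foldl
      (fun l i => pySwapA l i (-(1 + i))) encrypted_number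
  -- int(''.join(map(str, enc))): joining the str(d) is concatenating their character lists
  (PySem.Int.ofChars? (encrypted_number.flatMap PySem.Int.toChars)).getD 0

-- ===== PORT B =====
def encrypt_number_alt (number : Int) : Int :=
  let s := PySem.Int.toChars number                             -- str(number)
  (s.foldl (fun (rp : Int × Int) c =>
      (rp.1 + PySem.Int.mod ((PySem.Int.ofChars? [c]).getD 0 + 5) 10 * rp.2, rp.2 * 10))
    (0, 1)).1

-- ===== PRECONDITION & SPEC =====
-- For negative numbers str(number) starts with '-' and int('-') raises ValueError in both A and B.
def Pre_encrypt_number (number : Int) : Prop := 0 ≤ number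
instance (number : Int) : Decidable (Pre_encrypt_number number) := by
  unfold Pre_encrypt_number; infer_instance
def pvWitness_encrypt_number : Int := (42)

def Spec_encrypt_number (number : Int) (out : Int) : Prop := out = encrypt_number_alt number
instance (number : Int) (out : Int) : Decidable (Spec_encrypt_number number out) := by
  unfold Spec_encrypt_number; infer_instance

-- ===== CLAIM (what is proved, stated in full; the proofs are below) =====
def Claim_equal_encrypt_number : Prop := ∀ (number : Int), Dom_encrypt_number number →
  Pre_encrypt_number number → Spec_encrypt_number number (encrypt_number number)

-- ===== LEMMAS AND PROOFS =====

-- The shifted digit produced from one character, shared by both ports after unfolding.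
def shiftF (c : Char) : Int := PySem.Int.mod ((PySem.Int.ofChars? [c]).getD 0 + 5) 10

lemma shiftF_nonneg (c : Char) : 0 ≤ shiftF c := PySem.Int.mod_nonneg _ (by norm_num)
lemma shiftF_lt (c : Char) : shiftF c < 10 := PySem.Int.mod_lt _ (by norm_num)

-- ---- digit-character facts ----
lemma digit_not_space {c : Char} (h : c.isDigit = true) : PySem.Int.isIntSpace c = false := by
  simp [Char.isDigit] at h
  obtain ⟨h1, h2⟩ := h
  rw [UInt32.le_iff_toNat_le] at h1 h2
  simp only [show ((48:UInt32).toNat) = 48 from rfl, show ((57:UInt32).toNat) = 57 from rfl] at h1 h2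
  simp only [PySem.Int.isIntSpace, Char.ext_iff, UInt32.ext_iff, Bool.or_eq_false_iff,
    decide_eq_false_iff_not, show (' '.val.toNat) = 32 from rfl, show ('\t'.val.toNat) = 9 from rfl,
    show ('\n'.val.toNat) = 10 from rfl, show ('\x0d'.val.toNat) = 13 from rfl,
    show ('\x0b'.val.toNat) = 11 from rfl, show ('\x0c'.val.toNat) = 12 from rfl]
  omega

lemma digit_ne_minus {c : Char} (h : c.isDigit = true) : c ≠ '-' := by
  rintro rfl; simp [Char.isDigit] at h
lemma digit_ne_plus {c : Char} (h : c.isDigit = true) : c ≠ '+' := by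
  rintro rfl; simp [Char.isDigit] at h

-- ---- a copy of PySem's private digit parser, definitionally equal to it ----
def myGo : List Char → Bool → Nat → Option Nat
  | [], afterDigit, acc => if afterDigit then some acc else none
  | c :: rest, afterDigit, acc =>
    if c.isDigit then myGo rest true (acc * 10 + (c.toNat - '0'.toNat))
    else
      if c = '_' ∧ afterDigit then
        match rest with
        | d :: _ => if d.isDigit then myGo rest false acc else none
        | [] => none
      else none

def myDigitsVal? (cs : List Char) : Option Nat :=
  match cs with
  | [] => none
  | cs => myGo cs false 0

def natVal (cs : List Char) : Nat := cs.foldl (fun a c => a * 10 + (c.toNat - 48)) 0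

lemma myGo_digits : ∀ (cs : List Char) (acc : Nat) (b : Bool), cs ≠ [] →
    (∀ c ∈ cs, c.isDigit = true) →
    myGo cs b acc = some (cs.foldl (fun a c => a * 10 + (c.toNat - 48)) acc) := by
  intro cs
  induction cs with
  | nil => intro _ _ h; exact absurd rfl h
  | cons c rest ih =>
    intro acc b _ h
    have hc := h c (by simp)
    simp only [myGo, hc, if_true, List.foldl_cons, show '0'.toNat = 48 from rfl]
    cases rest with
    | nil => simp [myGo]
    | cons d tail => exact ih _ _ (by simp) (fun x hx => h x (List.mem_cons_of_mem _ hx))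

lemma strip_digits (cs : List Char) (hd : ∀ c ∈ cs, c.isDigit = true) :
    (List.dropWhile PySem.Int.isIntSpace
      (List.dropWhile PySem.Int.isIntSpace cs).reverse).reverse = cs := by
  have e1 : List.dropWhile PySem.Int.isIntSpace cs = cs := by
    cases cs with
    | nil => rfl
    | cons c t => simp [List.dropWhile, digit_not_space (hd c (by simp))]
  rw [e1]
  have e2 : List.dropWhile PySem.Int.isIntSpace cs.reverse = cs.reverse := by
    cases h : cs.reverse with
    | nil => rfl
    | cons c t =>
      have hc : c ∈ cs := by
        have : c ∈ cs.reverse := by rw [h]; simp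
        simpa using this
      simp [List.dropWhile, digit_not_space (hd c hc)]
  rw [e2, List.reverse_reverse]

-- int(s) on a nonempty all-digit string of length ≤ 10.
lemma parse_digits (cs : List Char) (h1 : cs ≠ []) (h2 : cs.length ≤ 10)
    (hd : ∀ c ∈ cs, c.isDigit = true) :
    PySem.Int.ofChars? cs = some ((natVal cs : Nat) : Int) := by
  rcases cs with _ | ⟨a1, cs⟩
  · exact absurd rfl h1
  ·
    rcases cs with _ | ⟨a2, cs⟩
    ·
      unfold PySem.Int.ofChars?
      simp only [strip_digits _ hd]
      split
      · rename_i heq; exact absurd (List.cons.inj heq).1 (digit_ne_minus (hd _ (by simp)))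
      · rename_i heq; exact absurd (List.cons.inj heq).1 (digit_ne_plus (hd _ (by simp)))
      · show Option.map (fun n : Int => n) ((myDigitsVal? (a1 :: [])).bind (fun k : Nat => some (k : Int))) = _
        rw [show myDigitsVal? (a1 :: []) = myGo (a1 :: []) false 0 from rfl, myGo_digits _ _ _ (by simp) hd]
        simp [natVal]
    ·
      rcases cs with _ | ⟨a3, cs⟩
      ·
        unfold PySem.Int.ofChars?
        simp only [strip_digits _ hd]
        split
        · rename_i heq; exact absurd (List.cons.inj heq).1 (digit_ne_minus (hd _ (by simp)))
        · rename_i heq; exact absurd (List.cons.inj heq).1 (digit_ne_plus (hd _ (by simp)))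
        · show Option.map (fun n : Int => n) ((myDigitsVal? (a1 :: a2 :: [])).bind (fun k : Nat => some (k : Int))) = _
          rw [show myDigitsVal? (a1 :: a2 :: []) = myGo (a1 :: a2 :: []) false 0 from rfl, myGo_digits _ _ _ (by simp) hd]
          simp [natVal]
      ·
        rcases cs with _ | ⟨a4, cs⟩
        ·
          unfold PySem.Int.ofChars?
          simp only [strip_digits _ hd]
          split
          · rename_i heq; exact absurd (List.cons.inj heq).1 (digit_ne_minus (hd _ (by simp)))
          · rename_i heq; exact absurd (List.cons.inj heq).1 (digit_ne_plus (hd _ (by simp)))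
          · show Option.map (fun n : Int => n) ((myDigitsVal? (a1 :: a2 :: a3 :: [])).bind (fun k : Nat => some (k : Int))) = _
            rw [show myDigitsVal? (a1 :: a2 :: a3 :: []) = myGo (a1 :: a2 :: a3 :: []) false 0 from rfl, myGo_digits _ _ _ (by simp) hd]
            simp [natVal]
        ·
          rcases cs with _ | ⟨a5, cs⟩
          ·
            unfold PySem.Int.ofChars?
            simp only [strip_digits _ hd]
            split
            · rename_i heq; exact absurd (List.cons.inj heq).1 (digit_ne_minus (hd _ (by simp)))
            · rename_i heq; exact absurd (List.cons.inj heq).1 (digit_ne_plus (hd _ (by simp)))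
            · show Option.map (fun n : Int => n) ((myDigitsVal? (a1 :: a2 :: a3 :: a4 :: [])).bind (fun k : Nat => some (k : Int))) = _
              rw [show myDigitsVal? (a1 :: a2 :: a3 :: a4 :: []) = myGo (a1 :: a2 :: a3 :: a4 :: []) false 0 from rfl, myGo_digits _ _ _ (by simp) hd]
              simp [natVal]
          ·
            rcases cs with _ | ⟨a6, cs⟩
            ·
              unfold PySem.Int.ofChars?
              simp only [strip_digits _ hd]
              split
              · rename_i heq; exact absurd (List.cons.inj heq).1 (digit_ne_minus (hd _ (by simp)))
              · rename_i heq; exact absurd (List.cons.inj heq).1 (digit_ne_plus (hd _ (by simp)))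
              · show Option.map (fun n : Int => n) ((myDigitsVal? (a1 :: a2 :: a3 :: a4 :: a5 :: [])).bind (fun k : Nat => some (k : Int))) = _
                rw [show myDigitsVal? (a1 :: a2 :: a3 :: a4 :: a5 :: []) = myGo (a1 :: a2 :: a3 :: a4 :: a5 :: []) false 0 from rfl, myGo_digits _ _ _ (by simp) hd]
                simp [natVal]
            ·
              rcases cs with _ | ⟨a7, cs⟩
              ·
                unfold PySem.Int.ofChars?
                simp only [strip_digits _ hd]
                split
                · rename_i heq; exact absurd (List.cons.inj heq).1 (digit_ne_minus (hd _ (by simp)))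
                · rename_i heq; exact absurd (List.cons.inj heq).1 (digit_ne_plus (hd _ (by simp)))
                · show Option.map (fun n : Int => n) ((myDigitsVal? (a1 :: a2 :: a3 :: a4 :: a5 :: a6 :: [])).bind (fun k : Nat => some (k : Int))) = _
                  rw [show myDigitsVal? (a1 :: a2 :: a3 :: a4 :: a5 :: a6 :: []) = myGo (a1 :: a2 :: a3 :: a4 :: a5 :: a6 :: []) false 0 from rfl, myGo_digits _ _ _ (by simp) hd]
                  simp [natVal]
              ·
                rcases cs with _ | ⟨a8, cs⟩
                ·
                  unfold PySem.Int.ofChars?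
                  simp only [strip_digits _ hd]
                  split
                  · rename_i heq; exact absurd (List.cons.inj heq).1 (digit_ne_minus (hd _ (by simp)))
                  · rename_i heq; exact absurd (List.cons.inj heq).1 (digit_ne_plus (hd _ (by simp)))
                  · show Option.map (fun n : Int => n) ((myDigitsVal? (a1 :: a2 :: a3 :: a4 :: a5 :: a6 :: a7 :: [])).bind (fun k : Nat => some (k : Int))) = _
                    rw [show myDigitsVal? (a1 :: a2 :: a3 :: a4 :: a5 :: a6 :: a7 :: []) = myGo (a1 :: a2 :: a3 :: a4 :: a5 :: a6 :: a7 :: []) false 0 from rfl, myGo_digits _ _ _ (by simp) hd]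
                    simp [natVal]
                ·
                  rcases cs with _ | ⟨a9, cs⟩
                  ·
                    unfold PySem.Int.ofChars?
                    simp only [strip_digits _ hd]
                    split
                    · rename_i heq; exact absurd (List.cons.inj heq).1 (digit_ne_minus (hd _ (by simp)))
                    · rename_i heq; exact absurd (List.cons.inj heq).1 (digit_ne_plus (hd _ (by simp)))
                    · show Option.map (fun n : Int => n) ((myDigitsVal? (a1 :: a2 :: a3 :: a4 :: a5 :: a6 :: a7 :: a8 :: [])).bind (fun k : Nat => some (k : Int))) = _
                      rw [show myDigitsVal? (a1 :: a2 :: a3 :: a4 :: a5 :: a6 :: a7 :: a8 :: []) = myGo (a1 :: a2 :: a3 :: a4 :: a5 :: a6 :: a7 :: a8 :: []) false 0 from rfl, myGo_digits _ _ _ (by simp) hd]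
                      simp [natVal]
                  ·
                    rcases cs with _ | ⟨a10, cs⟩
                    ·
                      unfold PySem.Int.ofChars?
                      simp only [strip_digits _ hd]
                      split
                      · rename_i heq; exact absurd (List.cons.inj heq).1 (digit_ne_minus (hd _ (by simp)))
                      · rename_i heq; exact absurd (List.cons.inj heq).1 (digit_ne_plus (hd _ (by simp)))
                      · show Option.map (fun n : Int => n) ((myDigitsVal? (a1 :: a2 :: a3 :: a4 :: a5 :: a6 :: a7 :: a8 :: a9 :: [])).bind (fun k : Nat => some (k : Int))) = _
                        rw [show myDigitsVal? (a1 :: a2 :: a3 :: a4 :: a5 :: a6 :: a7 :: a8 :: a9 :: []) = myGo (a1 :: a2 :: a3 :: a4 :: a5 :: a6 :: a7 :: a8 :: a9 :: []) false 0 from rfl, myGo_digits _ _ _ (by simp) hd]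
                        simp [natVal]
                    ·
                      cases cs with
                      | cons x t => exfalso; simp at h2; omega
                      | nil =>
                        unfold PySem.Int.ofChars?
                        simp only [strip_digits _ hd]
                        split
                        · rename_i heq; exact absurd (List.cons.inj heq).1 (digit_ne_minus (hd _ (by simp)))
                        · rename_i heq; exact absurd (List.cons.inj heq).1 (digit_ne_plus (hd _ (by simp)))
                        · show Option.map (fun n : Int => n) ((myDigitsVal? (a1 :: a2 :: a3 :: a4 :: a5 :: a6 :: a7 :: a8 :: a9 :: a10 :: [])).bind (fun k : Nat => some (k : Int))) = _
                          rw [show myDigitsVal? (a1 :: a2 :: a3 :: a4 :: a5 :: a6 :: a7 :: a8 :: a9 :: a10 :: []) = myGo (a1 :: a2 :: a3 :: a4 :: a5 :: a6 :: a7 :: a8 :: a9 :: a10 :: []) false 0 from rfl, myGo_digits _ _ _ (by simp) hd]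
                          simp [natVal]

-- ---- toChars facts ----
lemma digitChar_digit {m : Nat} (h : m < 10) : (Nat.digitChar m).isDigit = true := by
  interval_cases m <;> decide

lemma toDigits_digits (n : Nat) : ∀ c ∈ Nat.toDigits 10 n, c.isDigit = true := by
  induction n using Nat.strong_induction_on with
  | _ n ih =>
    rw [Nat.toDigits_eq_if (by norm_num)]
    split
    · intro c hc
      simp only [List.mem_singleton] at hc
      subst hc
      exact digitChar_digit (by omega)
    · rename_i hn
      intro c hc
      rcases List.mem_append.mp hc with h | h
      · exact ih (n / 10) (by omega) c h
      · simp only [List.mem_singleton] at h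
        subst h
        exact digitChar_digit (Nat.mod_lt _ (by norm_num))

lemma toDigits_ne_nil (n : Nat) : Nat.toDigits 10 n ≠ [] := by
  rw [Nat.toDigits_eq_if (by norm_num)]
  split <;> simp

lemma toChars_single (d : Int) (h0 : 0 ≤ d) (h1 : d < 10) :
    PySem.Int.toChars d = [Nat.digitChar d.toNat] ∧
    (Nat.digitChar d.toNat).isDigit = true ∧
    ((Nat.digitChar d.toNat).toNat - 48 : Nat) = d.toNat := by
  interval_cases d <;> exact ⟨rfl, rfl, rfl⟩

-- ---- the swap loop reverses the list ----
def swapPart (l : List Int) : List Int :=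
  let l1 := pySwapA l 0 (-1)
  (PySem.List.pyRange 1 (PySem.Int.floordiv (PySem.List.len l1) 2) 1).foldl
    (fun l i => pySwapA l i (-(1 + i))) l1

def natSwap (l : List Int) (i j : Nat) : List Int :=
  (l.set i (l.getD j 0)).set j (l.getD i 0)

lemma natSwap_length (l : List Int) (i j : Nat) : (natSwap l i j).length = l.length := by
  simp [natSwap]

lemma natSwap_getD (l : List Int) (i j m : Nat) (hi : i < l.length) (hj : j < l.length) :
    (natSwap l i j).getD m 0 =
      if m = j then l.getD i 0 else if m = i then l.getD j 0 else l.getD m 0 := by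
  unfold natSwap
  by_cases h1 : m = j
  · subst h1
    rw [if_pos rfl, List.getD_eq_getElem _ _ (by simpa using hj),
      List.getElem_set_self (by simpa using hj), List.getD_eq_getElem _ _ hi]
  · rw [if_neg h1]
    by_cases h2 : m = i
    · subst h2
      rw [if_pos rfl, List.getD_eq_getElem _ _ (by simpa using hi),
        List.getElem_set_ne (fun hh => h1 hh.symm) (by simpa using hi),
        List.getElem_set_self (by simpa using hi), List.getD_eq_getElem _ _ hj]
    · by_cases h3 : m < l.length
      · rw [if_neg h2, List.getD_eq_getElem _ _ (by simpa using h3),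
          List.getElem_set_ne (fun hh => h1 hh.symm) (by simpa using h3),
          List.getElem_set_ne (fun hh => h2 hh.symm) (by simpa using h3),
          List.getD_eq_getElem _ _ h3]
      · rw [if_neg h2, List.getD_eq_default _ _ (by simpa using h3),
          List.getD_eq_default _ _ (by omega)]

lemma pySetD_neg_nat (xs : List Int) (k : Nat) (v : Int) (h0 : 0 < k) (h : k ≤ xs.length) :
    PySem.List.pySetD xs (-(k : Int)) v = xs.set (xs.length - k) v := by
  have h1 : ¬ (0 ≤ -(k : Int)) := by omega
  have h2 : -((xs.length : Nat) : Int) ≤ -(k : Int) := by omega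
  simp only [PySem.List.pySetD, PySem.List.pySet?, PySem.List.pyIdx?, h1, if_pos h2,
    ite_false]
  rw [neg_neg]
  simp

lemma swapA_spec (l : List Int) (k : Nat) (hk : k + 1 ≤ l.length) :
    pySwapA l (k : Int) (-(1 + (k : Int))) = natSwap l k (l.length - 1 - k) := by
  have e1 : -(1 + (k : Int)) = -(((k + 1 : Nat)) : Int) := by push_cast; ring
  have g1 : PySem.List.pyGetD l (-(((k + 1 : Nat)) : Int)) 0 = l.getD (l.length - 1 - k) 0 := by
    rw [PySem.List.pyGetD_neg_natCast l (k + 1) 0 (by omega) (by omega)]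
    rw [List.getD_eq_getElem _ _ (by omega)]
    congr 1
    omega
  unfold pySwapA natSwap
  simp only [e1, g1, PySem.List.pyGetD_natCast, PySem.List.pySetD_natCast]
  rw [pySetD_neg_nat _ _ _ (by omega) (by simpa using hk)]
  have e2 : (l.set k (l.getD (l.length - 1 - k) 0)).length - (k + 1) = l.length - 1 - k := by
    simp; omega
  rw [e2]

-- the invariant: after k steps the first k and last k entries hold the reversed values
def SwapInv (l0 : List Int) (k : Nat) (l : List Int) : Prop :=
  l.length = l0.length ∧ ∀ j, j < l0.length →
    l.getD j 0 = if j < k ∨ l0.length - k ≤ j then l0.getD (l0.length - 1 - j) 0 else l0.getD j 0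

lemma inv_base (l0 : List Int) (h : l0 ≠ []) : SwapInv l0 1 (natSwap l0 0 (l0.length - 1)) := by
  have hn : 0 < l0.length := List.length_pos_iff.mpr h
  refine ⟨natSwap_length _ _ _, fun j hj => ?_⟩
  rw [natSwap_getD _ _ _ _ (by omega) (by omega)]
  by_cases h1 : j = l0.length - 1
  · rw [if_pos h1, if_pos (by omega)]
    congr 1
    omega
  · rw [if_neg h1]
    by_cases h2 : j = 0
    · rw [if_pos h2, if_pos (by omega)]
      congr 1
      omega
    · rw [if_neg h2, if_neg (by omega)]

lemma inv_step (l0 l : List Int) (k : Nat) (hk : k < l0.length / 2) (h : SwapInv l0 k l) :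
    SwapInv l0 (k + 1) (natSwap l k (l0.length - 1 - k)) := by
  obtain ⟨hlen, hget⟩ := h
  have hn : k + 1 < l0.length := by omega
  have e1 : l.getD k 0 = l0.getD k 0 := by
    rw [hget k (by omega), if_neg (by omega)]
  have e2 : l.getD (l0.length - 1 - k) 0 = l0.getD (l0.length - 1 - k) 0 := by
    rw [hget _ (by omega), if_neg (by omega)]
  refine ⟨by rw [natSwap_length, hlen], fun j hj => ?_⟩
  rw [natSwap_getD _ _ _ _ (by omega) (by omega)]
  by_cases h1 : j = l0.length - 1 - k
  · rw [if_pos h1, e1, if_pos (by omega)]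
    congr 1
    omega
  · rw [if_neg h1]
    by_cases h2 : j = k
    · rw [if_pos h2, e2, if_pos (by omega)]
      congr 1
      omega
    · rw [if_neg h2, hget j hj]
      exact if_congr (by omega) rfl rfl

lemma inv_loop (l0 l1 : List Int) (hbase : SwapInv l0 1 l1) :
    ∀ m : Nat, 1 ≤ m → m ≤ l0.length / 2 →
      SwapInv l0 m ((PySem.List.pyRange 1 (m : Int) 1).foldl (fun l i => pySwapA l i (-(1 + i))) l1) := by
  intro m
  induction m with
  | zero => omega
  | succ m ih =>
    intro _ hm
    rcases Nat.eq_or_lt_of_le (show 1 ≤ m + 1 from by omega) with h1 | h1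
    · rw [show ((m + 1 : Nat) : Int) = 1 by omega, PySem.List.pyRange_one_eq_nil (by norm_num)]
      have : m = 0 := by omega
      subst this
      exact hbase
    · have hm1 : 1 ≤ m := by omega
      have hrange : PySem.List.pyRange 1 ((m + 1 : Nat) : Int) 1
          = PySem.List.pyRange 1 (m : Int) 1 ++ [(m : Int)] := by
        push_cast
        exact PySem.List.pyRange_one_succ_right (by omega)
      rw [hrange, List.foldl_append]
      have hprev := ih hm1 (by omega)
      obtain ⟨hplen, hpget⟩ := hprev
      simp only [List.foldl_cons, List.foldl_nil]
      rw [swapA_spec _ m (by omega), hplen]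
      exact inv_step l0 _ m (by omega) ⟨hplen, hpget⟩

lemma rev_of_inv (l0 l : List Int) (hlen : l.length = l0.length)
    (hget : ∀ j, j < l0.length → l.getD j 0 = l0.getD (l0.length - 1 - j) 0) :
    l = l0.reverse := by
  apply List.ext_getElem (by simpa using hlen)
  intro j h1 h2
  have hj : j < l0.length := by omega
  have := hget j hj
  rw [List.getD_eq_getElem _ _ (by omega), List.getD_eq_getElem _ _ (by omega)] at this
  rw [this, List.getElem_reverse]

lemma swapPart_reverse (l : List Int) (h : l ≠ []) : swapPart l = l.reverse := by
  have hn : 0 < l.length := List.length_pos_iff.mpr h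
  have hfirst : pySwapA l 0 (-1) = natSwap l 0 (l.length - 1) := by
    have := swapA_spec l 0 (by omega)
    simpa using this
  have hbase := inv_base l h
  have hlen1 : (natSwap l 0 (l.length - 1)).length = l.length := natSwap_length _ _ _
  unfold swapPart
  rw [hfirst]
  simp only [PySem.List.len_eq, hlen1]
  rcases Nat.lt_or_ge l.length 2 with h2 | h2
  · -- length 1: the loop range is empty and the first swap is the identity on a singleton
    have h1 : l.length = 1 := by omega
    rw [show PySem.Int.floordiv ((l.length : Nat) : Int) 2 = ((l.length / 2 : Nat) : Int) from by
      exact_mod_cast PySem.Int.floordiv_natCast l.length 2]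
    rw [show ((l.length / 2 : Nat) : Int) = 0 by omega, PySem.List.pyRange_one_eq_nil (by norm_num)]
    simp only [List.foldl_nil]
    exact rev_of_inv l _ hlen1 (fun j hj => by
      obtain ⟨_, hg⟩ := hbase
      rw [hg j hj]
      split_ifs with c <;> [rfl; omega])
  · rw [show PySem.Int.floordiv ((l.length : Nat) : Int) 2 = ((l.length / 2 : Nat) : Int) from by
      exact_mod_cast PySem.Int.floordiv_natCast l.length 2]
    have hfin := inv_loop l _ hbase (l.length / 2) (by omega) le_rfl
    obtain ⟨hflen, hfget⟩ := hfin
    refine rev_of_inv l _ hflen (fun j hj => ?_)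
    rw [hfget j hj]
    split_ifs with c
    · rfl
    · have : l.length - 1 - j = j := by omega
      rw [this]

-- ---- B's fold ----
lemma b_fold (cs : List Char) : ∀ (r p : Int),
    (cs.foldl (fun (rp : Int × Int) c =>
        (rp.1 + PySem.Int.mod ((PySem.Int.ofChars? [c]).getD 0 + 5) 10 * rp.2, rp.2 * 10)) (r, p)).1
      = r + p * (cs.map shiftF).foldr (fun d a => d + 10 * a) 0 := by
  induction cs with
  | nil => intro r p; simp
  | cons c t ih =>
    intro r p
    simp only [List.foldl_cons, List.map_cons, List.foldr_cons, ih]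
    unfold shiftF
    ring

lemma foldl_reverse_horner (L : List Int) :
    L.reverse.foldl (fun a d => a * 10 + d) 0 = L.foldr (fun d a => d + 10 * a) 0 := by
  rw [List.foldl_reverse]
  induction L with
  | nil => rfl
  | cons d t ih => simp only [List.foldr_cons, ih]; ring

lemma natVal_map_digitChar_gen (L : List Int) : ∀ (aN : Nat) (aI : Int),
    (∀ d ∈ L, 0 ≤ d ∧ d < 10) → (aN : Int) = aI →
    (((L.map (fun d => Nat.digitChar d.toNat)).foldl (fun a c => a * 10 + (c.toNat - 48)) aN : Nat) : Int)
      = L.foldl (fun a d => a * 10 + d) aI := by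
  induction L with
  | nil => intro aN aI _ h; simpa using h
  | cons d t ih =>
    intro aN aI hL h
    obtain ⟨h0, h1⟩ := hL d (by simp)
    have hv := (toChars_single d h0 h1).2.2
    simp only [List.map_cons, List.foldl_cons, hv]
    refine ih _ _ (fun x hx => hL x (List.mem_cons_of_mem _ hx)) ?_
    push_cast
    rw [Int.toNat_of_nonneg h0, h]

lemma natVal_map_digitChar (L : List Int) (hL : ∀ d ∈ L, 0 ≤ d ∧ d < 10) :
    ((natVal (L.map (fun d => Nat.digitChar d.toNat)) : Nat) : Int)
      = L.foldl (fun a d => a * 10 + d) 0 := by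
  exact natVal_map_digitChar_gen L 0 0 hL rfl

lemma loop1_map (cs : List Char) :
    (PySem.List.pyRange 0 (PySem.List.len cs) 1).foldl
      (fun acc i =>
        let digit := (PySem.Int.ofChars? [PySem.List.pyGetD cs i ' ']).getD 0
        let digit := PySem.Int.mod (digit + 5) 10
        acc ++ [digit]) [] = cs.map shiftF := by
  show (PySem.List.pyRange 0 (PySem.List.len cs) 1).foldl
      (fun acc i => acc ++ [shiftF (PySem.List.pyGetD cs i ' ')]) [] = cs.map shiftF
  rw [PySem.List.foldl_append_singleton_eq_map (fun i => shiftF (PySem.List.pyGetD cs i ' '))]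
  rw [show (fun i => shiftF (PySem.List.pyGetD cs i ' '))
      = shiftF ∘ (fun i => PySem.List.pyGetD cs i ' ') from rfl]
  rw [← List.map_map, PySem.List.map_pyGetD_pyRange_zero]
  simp

lemma flatMap_toChars (L : List Int) (h : ∀ d ∈ L, 0 ≤ d ∧ d < 10) :
    L.flatMap PySem.Int.toChars = L.map (fun d => Nat.digitChar d.toNat) := by
  induction L with
  | nil => rfl
  | cons d t ih =>
    obtain ⟨h0, h1⟩ := h d (by simp)
    simp only [List.flatMap_cons, List.map_cons, (toChars_single d h0 h1).1,
      ih (fun x hx => h x (List.mem_cons_of_mem _ hx))]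
    rfl

-- ===== VERDICT (by name: the statement is the Claim_ definition above) =====
theorem encrypt_number_spec : Claim_equal_encrypt_number := by
  intro number hdom hpre
  have hd' : number ≤ 2147483648 := by
    simp [Dom_encrypt_number, pvDomInt] at hdom
    exact hdom.2
  have hpre' : 0 ≤ number := hpre
  unfold Spec_encrypt_number
  set s := PySem.Int.toChars number with hs_def
  have hs : s = Nat.toDigits 10 number.toNat := by
    rw [hs_def, PySem.Int.toChars, if_neg (by omega)]
  have hs_dig : ∀ c ∈ s, c.isDigit = true := by rw [hs]; exact toDigits_digits _
  have hs_ne : s ≠ [] := by rw [hs]; exact toDigits_ne_nil _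
  have hs_len : s.length ≤ 10 := by
    rw [hs]
    exact Nat.toDigits_length 10 number.toNat 10 (by norm_num) (by
      have : number.toNat ≤ 2147483648 := by omega
      norm_num
      omega)
  have hbounds : ∀ d ∈ (s.map shiftF).reverse, 0 ≤ d ∧ d < 10 := by
    intro d hd
    rw [List.mem_reverse] at hd
    obtain ⟨c, _, rfl⟩ := List.mem_map.mp hd
    exact ⟨shiftF_nonneg c, shiftF_lt c⟩
  set rds := (s.map shiftF).reverse with hrds_def
  have hmapne : s.map shiftF ≠ [] := by
    intro hcon
    exact hs_ne (List.map_eq_nil_iff.mp hcon)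
  have hA : encrypt_number number
      = (PySem.Int.ofChars? ((swapPart (s.map shiftF)).flatMap PySem.Int.toChars)).getD 0 := by
    unfold encrypt_number
    rw [← hs_def]
    simp only [loop1_map s]
    rfl
  have hdig2 : ∀ c ∈ rds.map (fun d => Nat.digitChar d.toNat), c.isDigit = true := by
    intro c hc
    obtain ⟨d, hd, rfl⟩ := List.mem_map.mp hc
    obtain ⟨h0, h1⟩ := hbounds d hd
    exact (toChars_single d h0 h1).2.1
  have hne2 : rds.map (fun d => Nat.digitChar d.toNat) ≠ [] := by
    simp only [hrds_def]
    intro hcon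
    simp at hcon
    exact hmapne (by simp [hcon])
  have hlen2 : (rds.map (fun d => Nat.digitChar d.toNat)).length ≤ 10 := by
    simp [hrds_def, hs_len]
  rw [hA, swapPart_reverse _ hmapne, ← hrds_def, flatMap_toChars _ hbounds,
    parse_digits _ hne2 hlen2 hdig2, Option.getD_some, natVal_map_digitChar _ hbounds,
    hrds_def, foldl_reverse_horner]
  unfold encrypt_number_alt
  rw [← hs_def]
  show _ = (s.foldl _ ((0 : Int), (1 : Int))).1
  rw [b_fold s 0 1]
  ring
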